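-- pv_equiv track=rewrite | github.com/CrowdStrike/tsv-data-analytics | python-packages/core/src/omigo_core/utils.py | extend_inherit_message
-- ===== SOURCE A (Python) =====
-- def extend_inherit_message(old_msg, new_msg):
--      # check if both msgs are defined
--      if (old_msg is not None and new_msg is not None):
--          parts1 = list([t.strip() for t in old_msg.split(":")])
--          parts2 = list([t.strip() for t in new_msg.split(":")])
--
--          # do a fuzzy match
--          if (len(parts2) == 2):
--              if (len(parts1) >= 2 and parts1[-2] == parts2[0]):
--                  new_msg = parts2[1]
--              elif (len(parts1) >= 3 and parts1[-3] == parts2[0]):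
--                  new_msg = parts2[1]
--              elif (len(parts1) >= 4 and parts1[-4] == parts2[0]):
--                  new_msg = parts2[1]
--              elif (len(parts1) >= 5 and parts1[-5] == parts2[0]):
--                  new_msg = parts2[1]
--
--      # return
--      return "{}: {}".format(old_msg, new_msg) if (old_msg is not None and len(old_msg) > 0) else "{}".format(new_msg)
-- ===== SOURCE B (Python) =====
-- def _last_index(items, key):
--     # position of the last occurrence of key in items, or None
--     j = None
--     for i, t in enumerate(items):
--         if t == key:
--             j = i
--     return j
--
--
-- def extend_inherit_message(old_msg, new_msg):
--     # B: instead of comparing the key against four fixed negative positions,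
--     # scan once for the LAST occurrence of the key among all components but the
--     # final one, and accept it iff its position lies within 4 slots of the end.
--     msg = new_msg
--     if old_msg is not None and new_msg is not None:
--         parts2 = [t.strip() for t in new_msg.split(":")]
--         if len(parts2) == 2:
--             parts1 = [t.strip() for t in old_msg.split(":")]
--             j = _last_index(parts1[:-1], parts2[0])
--             if j is not None and j >= len(parts1) - 5:
--                 msg = parts2[1]
--     return "{}: {}".format(old_msg, msg) if (old_msg is not None and len(old_msg) > 0) else "{}".format(msg)
-- ===== Notes on version B (the rewrite author's own statement) =====
-- stated objective: alternative
-- what changed: B replaces A's four fixed negative-index comparisons by a single enumerate scan that records the position of the LAST occurrence of the key among all components but the final one, then accepts iff that position is >= len(parts1)-5.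
import Mathlib
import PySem

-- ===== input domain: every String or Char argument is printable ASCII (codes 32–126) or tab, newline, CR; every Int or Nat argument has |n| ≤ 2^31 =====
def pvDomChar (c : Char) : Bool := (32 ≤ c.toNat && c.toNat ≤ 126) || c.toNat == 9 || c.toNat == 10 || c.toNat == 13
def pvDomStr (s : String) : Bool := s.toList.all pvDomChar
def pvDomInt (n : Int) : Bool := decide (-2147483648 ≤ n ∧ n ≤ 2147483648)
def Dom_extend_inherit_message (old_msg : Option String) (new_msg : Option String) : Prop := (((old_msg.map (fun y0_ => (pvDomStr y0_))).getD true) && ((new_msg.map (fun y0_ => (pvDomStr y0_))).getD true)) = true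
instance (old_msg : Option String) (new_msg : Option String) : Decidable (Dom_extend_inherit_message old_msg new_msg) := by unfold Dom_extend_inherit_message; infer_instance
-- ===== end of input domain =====

-- B replaces A's four fixed negative-index comparisons by one enumerate scan that
-- records the position of the last occurrence of the key among all components but
-- the final one, accepted iff that position is >= len(parts1)-5 (objective: alternative).

-- A-side helper: Python's "{}".format on a possibly-None string
def pyFmtOpt (o : Option String) : String :=
  match o with
  | none => "None"
  | some s => s

-- A-side helper: s.split(":") (sep is non-empty, so Python never raises; getD [] is unreachable)
def pySplitColon (s : String) : List String :=
  (PySem.Str.split? s ":").getD []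

-- ===== PORT A =====
def extend_inherit_message (old_msg : Option String) (new_msg : Option String) : String :=
  -- if (old_msg is not None and new_msg is not None): … (rebinding new_msg)
  let new_msg' : Option String :=
    match old_msg, new_msg with
    | some om, some nm =>
        let parts1 := (pySplitColon om).map (fun t => PySem.Str.strip t)
        let parts2 := (pySplitColon nm).map (fun t => PySem.Str.strip t)
        if parts2.length = 2 then
          -- the four elif branches; parts2[0]/parts2[1] are in range since len(parts2) == 2
          if 2 ≤ parts1.length ∧ PySem.List.pyGetD parts1 (-2) "" = PySem.List.pyGetD parts2 0 "" then
            some (PySem.List.pyGetD parts2 1 "")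
          else if 3 ≤ parts1.length ∧ PySem.List.pyGetD parts1 (-3) "" = PySem.List.pyGetD parts2 0 "" then
            some (PySem.List.pyGetD parts2 1 "")
          else if 4 ≤ parts1.length ∧ PySem.List.pyGetD parts1 (-4) "" = PySem.List.pyGetD parts2 0 "" then
            some (PySem.List.pyGetD parts2 1 "")
          else if 5 ≤ parts1.length ∧ PySem.List.pyGetD parts1 (-5) "" = PySem.List.pyGetD parts2 0 "" then
            some (PySem.List.pyGetD parts2 1 "")
          else some nm
        else some nm
    | _, _ => new_msg
  -- return "{}: {}".format(old_msg, new_msg) if (old_msg is not None and len(old_msg) > 0) else "{}".format(new_msg)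
  match old_msg with
  | some om => if 0 < PySem.Str.len om then om ++ ": " ++ pyFmtOpt new_msg' else pyFmtOpt new_msg'
  | none => pyFmtOpt new_msg'

-- ===== PORT B =====
-- B-side helper: Python's "{}".format on a possibly-None string
def pyFmtOptB (o : Option String) : String :=
  match o with
  | none => "None"
  | some s => s

-- B-side helper: s.split(":") (sep is non-empty, so Python never raises; getD [] is unreachable)
def pySplitColonB (s : String) : List String :=
  (PySem.Str.split? s ":").getD []

-- _last_index: 'j = None; for i, t in enumerate(items): if t == key: j = i; return j'
def lastIndexB (items : List String) (key : String) : Option Int :=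
  (PySem.List.enumerate items).foldl
    (fun j p => if p.2 = key then some p.1 else j) none

def extend_inherit_message_alt (old_msg : Option String) (new_msg : Option String) : String :=
  let msg : Option String :=
    match old_msg with
    | none => new_msg
    | some om =>
      match new_msg with
      | none => new_msg
      | some nm =>
        let parts2 := (pySplitColonB nm).map (fun t => PySem.Str.strip t)
        if parts2.length = 2 then
          let parts1 := (pySplitColonB om).map (fun t => PySem.Str.strip t)
          -- j = _last_index(parts1[:-1], parts2[0]); if j is not None and j >= len(parts1) - 5
          let j := lastIndexB (PySem.List.slice parts1 none (some (-1))) (PySem.List.pyGetD parts2 0 "")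
          if (match j with
              | some i => decide ((parts1.length : Int) - 5 ≤ i)
              | none => false) then
            some (PySem.List.pyGetD parts2 1 "")
          else some nm
        else some nm
  match old_msg with
  | some om => if 0 < PySem.Str.len om then om ++ ": " ++ pyFmtOptB msg else pyFmtOptB msg
  | none => pyFmtOptB msg

-- ===== PRECONDITION & SPEC =====
def Spec_extend_inherit_message (old_msg : Option String) (new_msg : Option String) (out : String) : Prop := out = extend_inherit_message_alt old_msg new_msg
instance (old_msg : Option String) (new_msg : Option String) (out : String) : Decidable (Spec_extend_inherit_message old_msg new_msg out) := by unfold Spec_extend_inherit_message; infer_instance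

-- ===== CLAIM (what is proved, stated in full; the proofs are below) =====
def Claim_equal_extend_inherit_message : Prop := ∀ (old_msg : Option String) (new_msg : Option String), Dom_extend_inherit_message old_msg new_msg → Spec_extend_inherit_message old_msg new_msg (extend_inherit_message old_msg new_msg)

-- ===== LEMMAS AND PROOFS =====

theorem pySplitColonB_eq (s : String) : pySplitColonB s = pySplitColon s := rfl

theorem pyFmtOptB_eq (o : Option String) : pyFmtOptB o = pyFmtOpt o := rfl

theorem lastIndexB_nil (key : String) : lastIndexB [] key = none := rfl

theorem enumerate_append_singleton (l : List String) (x : String) (s : Int) :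
    PySem.List.enumerate (l ++ [x]) s = PySem.List.enumerate l s ++ [((s + l.length : Int), x)] := by
  induction l generalizing s with
  | nil => simp [PySem.List.enumerate_nil, PySem.List.enumerate_cons]
  | cons y ys ih =>
      simp only [List.cons_append, PySem.List.enumerate_cons, ih, List.length_cons]
      push_cast; ring_nf

theorem lastIndexB_append (l : List String) (x key : String) :
    lastIndexB (l ++ [x]) key = if x = key then some (l.length : Int) else lastIndexB l key := by
  unfold lastIndexB
  rw [enumerate_append_singleton, List.foldl_append]
  simp

theorem lastIndexB_lt (l : List String) (key : String) (i : Int)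
    (h : lastIndexB l key = some i) : 0 ≤ i ∧ i < l.length := by
  induction l using List.reverseRecOn with
  | nil => simp [lastIndexB, PySem.List.enumerate_nil] at h
  | append_singleton ys x ih =>
      rw [lastIndexB_append] at h
      by_cases hx : x = key
      · simp [hx] at h
        constructor
        · omega
        · simp; omega
      · rw [if_neg hx] at h
        rcases ih h with ⟨h0, h1⟩
        refine ⟨h0, ?_⟩
        simp; omega

-- the length-4 case of cond_iff, for an explicit list [d, c, b, a]
set_option maxHeartbeats 1600000 in
theorem cond_four (a b c d key : String) :
    ((match lastIndexB ([d, c, b, a] : List String).dropLast key with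
      | some i => decide ((([d, c, b, a] : List String).length : Int) - 5 ≤ i)
      | none => false) = true)
    ↔ ((2 ≤ ([d, c, b, a] : List String).length ∧ PySem.List.pyGetD [d, c, b, a] (-2) "" = key) ∨
       (3 ≤ ([d, c, b, a] : List String).length ∧ PySem.List.pyGetD [d, c, b, a] (-3) "" = key) ∨
       (4 ≤ ([d, c, b, a] : List String).length ∧ PySem.List.pyGetD [d, c, b, a] (-4) "" = key) ∨
       (5 ≤ ([d, c, b, a] : List String).length ∧ PySem.List.pyGetD [d, c, b, a] (-5) "" = key)) := by
  have e0 : lastIndexB [d] key = if d = key then some 0 else none := by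
    simpa [lastIndexB_nil] using lastIndexB_append [] d key
  have e1 : lastIndexB [d, c] key
      = if c = key then some 1 else if d = key then some 0 else none := by
    simpa [e0] using lastIndexB_append [d] c key
  have e2 : lastIndexB [d, c, b] key
      = if b = key then some 2 else if c = key then some 1
        else if d = key then some 0 else none := by
    simpa [e1] using lastIndexB_append [d, c] b key
  simp only [List.dropLast, e2]
  norm_num [pysem]
  split_ifs with h1 h2 h3 <;> simp_all

-- B's test "last occurrence of the key in l[:-1] is at position ≥ len(l)-5" ↔ A's four guarded comparisons
theorem cond_iff (l : List String) (key : String) :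
    ((match lastIndexB (PySem.List.slice l none (some (-1))) key with
      | some i => decide ((l.length : Int) - 5 ≤ i)
      | none => false) = true)
    ↔ ((2 ≤ l.length ∧ PySem.List.pyGetD l (-2) "" = key) ∨
       (3 ≤ l.length ∧ PySem.List.pyGetD l (-3) "" = key) ∨
       (4 ≤ l.length ∧ PySem.List.pyGetD l (-4) "" = key) ∨
       (5 ≤ l.length ∧ PySem.List.pyGetD l (-5) "" = key)) := by
  rw [PySem.List.slice_to_neg_one]
  rcases hr : l.reverse with _ | ⟨a, r⟩
  · have hl : l = [] := by simpa using congrArg List.reverse hr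
    subst hl; simp [lastIndexB, PySem.List.enumerate_nil]
  · rcases r with _ | ⟨b, r⟩
    · have hl : l = [a] := by simpa using congrArg List.reverse hr
      subst hl; simp [lastIndexB, PySem.List.enumerate_nil]
    · rcases r with _ | ⟨c, r⟩
      · have hl : l = [b, a] := by simpa using congrArg List.reverse hr
        subst hl
        have e : lastIndexB [b] key = if b = key then some 0 else none := by
          simpa [lastIndexB_nil] using lastIndexB_append [] b key
        simp only [List.dropLast, e]
        norm_num [pysem]
        split_ifs with h <;> simp_all
      · rcases r with _ | ⟨d, r⟩
        · have hl : l = [c, b, a] := by simpa using congrArg List.reverse hr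
          subst hl
          have e0 : lastIndexB [c] key = if c = key then some 0 else none := by
            simpa [lastIndexB_nil] using lastIndexB_append [] c key
          have e : lastIndexB [c, b] key
              = if b = key then some 1 else if c = key then some 0 else none := by
            simpa [e0] using lastIndexB_append [c] b key
          simp only [List.dropLast, e]
          norm_num [pysem]
          split_ifs with h1 h2 <;> simp_all
        · rcases r with _ | ⟨e, r⟩
          · have hl : l = [d, c, b, a] := by simpa using congrArg List.reverse hr
            subst hl
            exact cond_four a b c d key
          · have hl : l = r.reverse ++ [e, d, c, b, a] := by
              simpa using congrArg List.reverse hr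
            subst hl
            have hn : (r.reverse ++ [e, d, c, b, a]).length = r.length + 5 := by simp
            have hdl : (r.reverse ++ [e, d, c, b, a]).dropLast = r.reverse ++ [e, d, c, b] := by
              have h5 : r.reverse ++ [e, d, c, b, a] = (r.reverse ++ [e, d, c, b]) ++ [a] := by simp
              rw [h5, List.dropLast_concat]
            have hassoc : r.reverse ++ [e, d, c, b] = (((r.reverse ++ [e]) ++ [d]) ++ [c]) ++ [b] := by simp
            have g2 : PySem.List.pyGetD (r.reverse ++ [e, d, c, b, a]) (-2) "" = b := by
              rw [PySem.List.pyGetD_neg_ofNat _ 2 "" (by omega) (by simp)]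
              rw [List.getElem_append_right (by simp)]
              simp
            have g3 : PySem.List.pyGetD (r.reverse ++ [e, d, c, b, a]) (-3) "" = c := by
              rw [PySem.List.pyGetD_neg_ofNat _ 3 "" (by omega) (by simp)]
              rw [List.getElem_append_right (by simp)]
              simp
            have g4 : PySem.List.pyGetD (r.reverse ++ [e, d, c, b, a]) (-4) "" = d := by
              rw [PySem.List.pyGetD_neg_ofNat _ 4 "" (by omega) (by simp)]
              rw [List.getElem_append_right (by simp)]
              simp
            have g5 : PySem.List.pyGetD (r.reverse ++ [e, d, c, b, a]) (-5) "" = e := by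
              rw [PySem.List.pyGetD_neg_ofNat _ 5 "" (by omega) (by simp)]
              rw [List.getElem_append_right (by simp)]
              simp
            rw [hdl, hn, g2, g3, g4, g5, hassoc]
            rw [lastIndexB_append, lastIndexB_append, lastIndexB_append, lastIndexB_append]
            by_cases hb : b = key
            · simp [hb]
            · rw [if_neg hb]
              by_cases hc : c = key
              · simp [hc, hb]
              · rw [if_neg hc]
                by_cases hd : d = key
                · simp [hd, hb, hc]
                · rw [if_neg hd]
                  by_cases he : e = key
                  · simp [he, hb, hc, hd]
                  · rw [if_neg he]
                    rcases hj : lastIndexB r.reverse key with _ | i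
                    · simp [hb, hc, hd, he]
                    · rcases lastIndexB_lt _ _ _ hj with ⟨h0, h1⟩
                      simp only [List.length_reverse] at h1
                      simp [hb, hc, hd, he]
                      omega

-- A's elif chain equals B's last-occurrence test, over arbitrary part lists
set_option maxHeartbeats 1600000 in
theorem merge_eq (l p2 : List String) (nm : String) :
    (if p2.length = 2 then
        if 2 ≤ l.length ∧ PySem.List.pyGetD l (-2) "" = PySem.List.pyGetD p2 0 "" then
          some (PySem.List.pyGetD p2 1 "")
        else if 3 ≤ l.length ∧ PySem.List.pyGetD l (-3) "" = PySem.List.pyGetD p2 0 "" then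
          some (PySem.List.pyGetD p2 1 "")
        else if 4 ≤ l.length ∧ PySem.List.pyGetD l (-4) "" = PySem.List.pyGetD p2 0 "" then
          some (PySem.List.pyGetD p2 1 "")
        else if 5 ≤ l.length ∧ PySem.List.pyGetD l (-5) "" = PySem.List.pyGetD p2 0 "" then
          some (PySem.List.pyGetD p2 1 "")
        else some nm
      else some nm)
    = (if p2.length = 2 then
        if (match lastIndexB (PySem.List.slice l none (some (-1))) (PySem.List.pyGetD p2 0 "") with
            | some i => decide ((l.length : Int) - 5 ≤ i)
            | none => false) then
          some (PySem.List.pyGetD p2 1 "")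
        else some nm
      else some nm) := by
  by_cases h2 : p2.length = 2
  · simp only [h2, if_true]
    by_cases hc : (match lastIndexB (PySem.List.slice l none (some (-1))) (PySem.List.pyGetD p2 0 "") with
        | some i => decide ((l.length : Int) - 5 ≤ i)
        | none => false) = true
    · have hA := (cond_iff l (PySem.List.pyGetD p2 0 "")).mp hc
      rw [if_pos hc]
      split_ifs <;> tauto
    · have hA := (cond_iff l (PySem.List.pyGetD p2 0 "")).not.mp hc
      rw [if_neg hc]
      split_ifs <;> tauto
  · simp only [h2, if_false]

-- ===== VERDICT (by name: the statement is the Claim_ definition above) =====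
theorem extend_inherit_message_spec : Claim_equal_extend_inherit_message := by
  intro old_msg new_msg _
  unfold Spec_extend_inherit_message extend_inherit_message extend_inherit_message_alt
  rcases old_msg with _ | om
  · rcases new_msg with _ | nm <;> rfl
  · rcases new_msg with _ | nm
    · rfl
    · simp only [pySplitColonB_eq, pyFmtOptB_eq]
      rw [merge_eq]
      rfl
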